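-- pv_equiv track=rewrite | github.com/austinProGit/scheduler | src/schedule_inspector.py | semester_type_of_course
-- ===== SOURCE A (Python) =====
-- def schedule_length(schedule):
--     return len(schedule)
--
-- def semester_type_sequence(schedule):
--     SEMESTER_TYPE_SUCCESSOR = {'Fa': 'Sp', 'Sp': 'Su', 'Su': 'Fa'}
--     sequence = None
--     previous_season = 'Su'
--     if schedule_length(schedule) > 0:
--         sequence = []
--         for semester in schedule:
--             sequence.append(SEMESTER_TYPE_SUCCESSOR[previous_season])
--             previous_season = SEMESTER_TYPE_SUCCESSOR[previous_season]
--     return sequence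
--
-- def semester_type_of_course(schedule, courseID):
--     semester_type = None
--     sequence = semester_type_sequence(schedule)
--     for semester in range(schedule_length(schedule)):
--         if courseID in schedule[semester]:
--             semester_type = sequence[semester]
--             break
--     return semester_type
-- ===== SOURCE B (Python) =====
-- def semester_type_of_course(schedule, courseID):
--     for i, semester in enumerate(schedule):
--         if courseID in semester:
--             return ('Fa', 'Sp', 'Su')[i % 3]
--     return None
-- ===== Notes on version B (the rewrite author's own statement) =====
-- stated objective: simpler
-- what changed: Single enumerate loop returning the season by closed-form index arithmetic i % 3 into a fixed cycle, instead of first building a full season list via a successor-dictionary pass and then a second index loop into that list.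
import Mathlib
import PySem

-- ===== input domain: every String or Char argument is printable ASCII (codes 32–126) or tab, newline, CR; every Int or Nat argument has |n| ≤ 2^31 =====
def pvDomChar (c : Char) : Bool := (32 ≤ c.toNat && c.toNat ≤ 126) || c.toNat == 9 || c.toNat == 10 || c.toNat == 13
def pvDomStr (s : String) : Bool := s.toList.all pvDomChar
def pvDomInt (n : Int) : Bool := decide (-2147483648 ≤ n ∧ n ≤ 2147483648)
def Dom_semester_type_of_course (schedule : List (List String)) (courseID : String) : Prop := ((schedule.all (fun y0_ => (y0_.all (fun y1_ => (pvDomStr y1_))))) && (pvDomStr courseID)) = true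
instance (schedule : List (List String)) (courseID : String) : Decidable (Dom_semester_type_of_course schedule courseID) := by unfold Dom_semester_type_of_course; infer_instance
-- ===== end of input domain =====

-- B: single enumerate loop with closed-form index arithmetic (i % 3) into a fixed season
-- cycle, instead of A's separate successor-dictionary pass building a season list plus a
-- second index loop; objective: simpler.


-- ===== PORT A =====
-- SEMESTER_TYPE_SUCCESSOR = {'Fa': 'Sp', 'Sp': 'Su', 'Su': 'Fa'}; lookup never misses in A
def pvSuccDict : PySem.Dict String String :=
  PySem.Dict.ofList [("Fa", "Sp"), ("Sp", "Su"), ("Su", "Fa")]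

def pvSucc (s : String) : String := (PySem.Dict.get? pvSuccDict s).getD ""

-- def schedule_length(schedule): return len(schedule)
def schedule_length (schedule : List (List String)) : Int := schedule.length

-- the 'for semester in schedule' loop of semester_type_sequence, threading previous_season
def pvSeqLoop (previous_season : String) : List (List String) → List String
  | [] => []
  | _ :: rest => pvSucc previous_season :: pvSeqLoop (pvSucc previous_season) rest

def semester_type_sequence (schedule : List (List String)) : Option (List String) :=
  if schedule_length schedule > 0 then some (pvSeqLoop "Su" schedule) else none

-- the 'for semester in range(schedule_length(schedule))' loop with its break
def pvFindLoop (schedule : List (List String)) (courseID : String)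
    (sequence : Option (List String)) : List Int → Option String
  | [] => none
  | i :: rest =>
      if courseID ∈ PySem.List.pyGetD schedule i [] then
        PySem.List.pyGet? (sequence.getD []) i   -- sequence[semester]; in A sequence is a list and i in range here
      else pvFindLoop schedule courseID sequence rest

def semester_type_of_course (schedule : List (List String)) (courseID : String) : Option String :=
  let sequence := semester_type_sequence schedule
  pvFindLoop schedule courseID sequence (PySem.List.pyRange 0 (schedule_length schedule) 1)

-- ===== PORT B =====
-- for i, semester in enumerate(schedule): if courseID in semester: return ('Fa','Sp','Su')[i % 3]
def pvAltLoop (courseID : String) : List (List String) → Nat → Option String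
  | [], _ => none
  | sem :: rest, i =>
      if courseID ∈ sem then
        PySem.List.pyGet? ["Fa", "Sp", "Su"] (PySem.Int.mod (i : Int) 3)
      else pvAltLoop courseID rest (i + 1)

def semester_type_of_course_alt (schedule : List (List String)) (courseID : String) : Option String :=
  pvAltLoop courseID schedule 0

-- ===== PRECONDITION & SPEC =====
def Spec_semester_type_of_course (schedule : List (List String)) (courseID : String) (out : Option String) : Prop := out = semester_type_of_course_alt schedule courseID
instance (schedule : List (List String)) (courseID : String) (out : Option String) : Decidable (Spec_semester_type_of_course schedule courseID out) := by unfold Spec_semester_type_of_course; infer_instance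

-- ===== CLAIM (what is proved, stated in full; the proofs are below) =====
def Claim_equal_semester_type_of_course : Prop := ∀ (schedule : List (List String)) (courseID : String), Dom_semester_type_of_course schedule courseID → Spec_semester_type_of_course schedule courseID (semester_type_of_course schedule courseID)

-- ===== LEMMAS AND PROOFS =====

-- the sequence A builds is the k-fold successor of 'Su', position by position
lemma pvSeqLoop_eq_map (prev : String) :
    ∀ (sched : List (List String)),
      pvSeqLoop prev sched = (List.range sched.length).map (fun k => pvSucc^[k + 1] prev) := by
  intro sched
  induction sched generalizing prev with
  | nil => simp [pvSeqLoop]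
  | cons x rest ih =>
      simp [pvSeqLoop, ih (pvSucc prev), List.range_succ_eq_map, List.map_map,
        Function.comp_def, Function.iterate_succ_apply]

lemma pvSucc_period (k : Nat) : pvSucc^[k + 3] "Su" = pvSucc^[k] "Su" := by
  have h : pvSucc^[3] "Su" = "Su" := by decide
  calc pvSucc^[k + 3] "Su" = pvSucc^[k] (pvSucc^[3] "Su") := by
        rw [Function.iterate_add_apply]
    _ = pvSucc^[k] "Su" := by rw [h]

lemma pvSucc_mod (k : Nat) : pvSucc^[k + 1] "Su" = pvSucc^[k % 3 + 1] "Su" := by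
  induction k using Nat.strong_induction_on with
  | _ k ih =>
      by_cases h : k < 3
      · interval_cases k <;> rfl
      · have h3 : k - 3 < k := by omega
        have hk : k = (k - 3) + 3 := by omega
        rw [hk]
        have := pvSucc_period (k - 3 + 1)
        have h2 : k - 3 + 1 + 3 = k - 3 + 3 + 1 := by omega
        rw [h2] at this
        rw [this, ih (k - 3) h3]
        congr 2
        omega

lemma pvCycle_get (k : Nat) :
    PySem.List.pyGet? ["Fa", "Sp", "Su"] (PySem.Int.mod (k : Int) 3)
      = some (pvSucc^[k % 3 + 1] "Su") := by
  have hc : PySem.Int.mod (k : Int) 3 = ((k % 3 : Nat) : Int) := by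
    exact_mod_cast PySem.Int.mod_natCast k 3
  rw [hc]
  have h : k % 3 < 3 := Nat.mod_lt _ (by omega)
  interval_cases h' : k % 3 <;> rfl

-- the element A reads out of its sequence equals B's closed-form cycle lookup
lemma pvSeq_get (sched : List (List String)) (k : Nat) (hk : k < sched.length) :
    PySem.List.pyGet? (pvSeqLoop "Su" sched) (k : Int)
      = PySem.List.pyGet? ["Fa", "Sp", "Su"] (PySem.Int.mod (k : Int) 3) := by
  rw [pvSeqLoop_eq_map, PySem.List.pyGet?_natCast, pvCycle_get]
  rw [List.getElem?_map]
  have h := pvSucc_mod k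
  rw [Function.iterate_succ_apply, Function.iterate_succ_apply] at h
  simp [List.getElem?_range hk, h]

-- A's index loop from position j equals B's structural loop on the dropped list
lemma pvLoop_eq (courseID : String) (full : List (List String)) :
    ∀ (j : Nat), j ≤ full.length →
      pvFindLoop full courseID (some (pvSeqLoop "Su" full))
          (PySem.List.pyRange (j : Int) (full.length : Int) 1)
        = pvAltLoop courseID (full.drop j) j := by
  intro j hj
  induction hfuel : full.length - j generalizing j with
  | zero =>
      have hj' : j = full.length := by omega
      subst hj'
      rw [PySem.List.pyRange_one_eq_nil (by omega), List.drop_length]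
      rfl
  | succ n ih =>
      have hjlt : j < full.length := by omega
      rw [PySem.List.pyRange_one_cons (by exact_mod_cast hjlt)]
      rw [List.drop_eq_getElem_cons hjlt]
      simp only [pvFindLoop, pvAltLoop]
      have hget : PySem.List.pyGetD full (j : Int) [] = full[j] := by
        simp [PySem.List.pyGetD_natCast, hjlt]
      rw [hget]
      by_cases hmem : courseID ∈ full[j]
      · simp only [hmem, if_pos]
        simpa using pvSeq_get full j hjlt
      · simp only [hmem, if_neg, not_false_iff]
        have hcast : ((j : Int) + 1) = ((j + 1 : Nat) : Int) := by push_cast; ring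
        rw [hcast]
        exact ih (j + 1) (by omega) (by omega)

-- ===== VERDICT (by name: the statement is the Claim_ definition above) =====
theorem semester_type_of_course_spec : Claim_equal_semester_type_of_course := by
  intro schedule courseID _
  unfold Spec_semester_type_of_course
  cases schedule with
  | nil => rfl
  | cons s rest =>
      unfold semester_type_of_course semester_type_sequence schedule_length
      rw [if_pos (by exact_mod_cast Nat.succ_pos rest.length)]
      have := pvLoop_eq courseID (s :: rest) 0 (by omega)
      simpa [semester_type_of_course_alt] using this
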